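-- pv_equiv track=rewrite | github.com/ascheel/picpi | picpi.py | getRelative
-- ===== SOURCE A (Python) =====
-- def getRelative(path,base):
-- 	oldPath = path.split('/')
-- 	base_dir = base.split('/')
-- 	relativePath = None
-- 	try:
-- 		while base_dir[0].lower() == oldPath[0].lower():
-- 			del oldPath[0]
-- 			del base_dir[0]
-- 	except IndexError:
-- 		relativePath = '/'.join(oldPath)
-- 	if not relativePath:
-- 		relativePath = path
-- 	return relativePath
-- ===== SOURCE B (Python) =====
-- def getRelative(path, base):
--     p = path.split('/')
--     b = base.split('/')
--     m = 0
--     for x, y in zip(p, b):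
--         if x.lower() != y.lower():
--             break
--         m += 1
--     if m == len(b) and m < len(p):
--         return '/'.join(p[m:]) or path
--     return path
-- ===== Notes on version B (the rewrite author's own statement) =====
-- stated objective: simpler
-- what changed: Replaces A's destructive del-from-both-lists loop with try/except IndexError control flow by a single forward count of the case-insensitive common component prefix followed by plain conditionals.
import Mathlib
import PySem

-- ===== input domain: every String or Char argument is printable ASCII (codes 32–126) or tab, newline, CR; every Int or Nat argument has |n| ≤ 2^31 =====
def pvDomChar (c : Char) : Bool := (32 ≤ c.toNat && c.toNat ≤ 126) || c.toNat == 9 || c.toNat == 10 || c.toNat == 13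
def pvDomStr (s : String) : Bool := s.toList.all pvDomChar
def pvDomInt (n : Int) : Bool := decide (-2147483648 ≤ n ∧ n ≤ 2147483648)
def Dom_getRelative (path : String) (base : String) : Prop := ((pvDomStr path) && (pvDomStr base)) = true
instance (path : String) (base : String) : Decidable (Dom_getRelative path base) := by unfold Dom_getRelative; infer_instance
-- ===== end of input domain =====

-- B replaces A's destructive del-in-loop with try/except control flow by a single
-- forward count of the case-insensitive common component prefix plus plain conditionals
-- (objective: simpler; same value everywhere).

-- ===== PORT A =====
-- A's 'while base_dir[0].lower() == oldPath[0].lower(): del …' inside try/except IndexError: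
-- returns some <current oldPath> when an IndexError fires (base_dir empty is checked first,
-- then oldPath; '/'.join of the state at that moment), none when the loop exits on a mismatch.
def pvLoopA : List String → List String → Option (List String)
  | op, [] => some op                         -- base_dir[0] raises IndexError
  | [], _ :: _ => some []                     -- oldPath[0] raises IndexError
  | o0 :: os, b0 :: bs =>
    if PySem.Str.lower b0 = PySem.Str.lower o0 then pvLoopA os bs else none

def getRelative (path : String) (base : String) : String :=
  let oldPath := (PySem.Str.split? path "/").getD []
  let base_dir := (PySem.Str.split? base "/").getD []
  -- relativePath = None; try/while/except; 'if not relativePath: relativePath = path'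
  match pvLoopA oldPath base_dir with
  | none => path
  | some rest =>
    let r := PySem.Str.join "/" rest
    if r = "" then path else r

-- ===== PORT B =====
-- B's 'for x, y in zip(p, b): if mismatch break; m += 1' counting the common prefix.
def pvCountB : List String → List String → Nat
  | x :: xs, y :: ys =>
    if PySem.Str.lower x = PySem.Str.lower y then pvCountB xs ys + 1 else 0
  | _, _ => 0

def getRelative_alt (path : String) (base : String) : String :=
  let p := (PySem.Str.split? path "/").getD []
  let b := (PySem.Str.split? base "/").getD []
  let m := pvCountB p b
  if m = b.length ∧ m < p.length then
    let r := PySem.Str.join "/" (p.drop m)   -- '/'.join(p[m:]), 0 ≤ m ≤ len(p)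
    if r = "" then path else r               -- '… or path'
  else path

-- ===== PRECONDITION & SPEC =====
def Spec_getRelative (path : String) (base : String) (out : String) : Prop := out = getRelative_alt path base
instance (path : String) (base : String) (out : String) : Decidable (Spec_getRelative path base out) := by unfold Spec_getRelative; infer_instance

-- ===== CLAIM (what is proved, stated in full; the proofs are below) =====
def Claim_equal_getRelative : Prop := ∀ (path : String) (base : String), Dom_getRelative path base → Spec_getRelative path base (getRelative path base)

-- ===== LEMMAS AND PROOFS =====

theorem pvCountB_le (p b : List String) : pvCountB p b ≤ min p.length b.length := by
  induction p generalizing b with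
  | nil => simp [pvCountB]
  | cons x xs ih =>
    cases b with
    | nil => simp [pvCountB]
    | cons y ys =>
      simp only [pvCountB, List.length_cons]
      have := ih ys
      split <;> omega

theorem pvLoopA_eq (p b : List String) :
    pvLoopA p b =
      if pvCountB p b = min p.length b.length then some (p.drop b.length) else none := by
  induction p generalizing b with
  | nil =>
    cases b with
    | nil => simp [pvLoopA, pvCountB]
    | cons y ys => simp [pvLoopA, pvCountB]
  | cons x xs ih =>
    cases b with
    | nil => simp [pvLoopA, pvCountB]
    | cons y ys =>
      simp only [pvLoopA, pvCountB, List.length_cons, List.drop_succ_cons]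
      by_cases h : PySem.Str.lower y = PySem.Str.lower x
      · rw [if_pos h, if_pos h.symm, ih ys]
        have hm : (xs.length + 1) ⊓ (ys.length + 1) = xs.length ⊓ ys.length + 1 := by omega
        rw [hm]
        simp
      · have h2 : ¬(PySem.Str.lower x = PySem.Str.lower y) := fun e => h e.symm
        rw [if_neg h, if_neg h2]
        have h3 : ¬ ((0 : Nat) = (xs.length + 1) ⊓ (ys.length + 1)) := by omega
        rw [if_neg h3]
-- ===== VERDICT (by name: the statement is the Claim_ definition above) =====
theorem getRelative_spec : Claim_equal_getRelative := by
  intro path base _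
  unfold Spec_getRelative getRelative getRelative_alt
  dsimp only
  set p := (PySem.Str.split? path "/").getD [] with hp
  set b := (PySem.Str.split? base "/").getD [] with hb
  rw [pvLoopA_eq]
  have hle := pvCountB_le p b
  by_cases hmin : pvCountB p b = min p.length b.length
  · rw [if_pos hmin]
    by_cases hc : pvCountB p b = b.length ∧ pvCountB p b < p.length
    · rw [if_pos hc]
      rw [hc.1]
    · rw [if_neg hc]
      -- here m = min and ¬(m = |b| ∧ m < |p|), so p.drop b.length = [] and join = ""
      have hdrop : p.drop b.length = [] := by
        apply List.drop_eq_nil_of_le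
        omega
      rw [hdrop]
      simp [PySem.Str.join]
  · rw [if_neg hmin]
    have hc : ¬ (pvCountB p b = b.length ∧ pvCountB p b < p.length) := by omega
    rw [if_neg hc]
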